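-- pv_equiv track=rewrite | github.com/pypi-data/pypi-mirror-252 | packages/LogsParserAIR/LogsParserAIR-0.6-py3-none-any.whl/LogsParserAIR/main.py | longest_shortest_successful_run_times
-- ===== SOURCE A (Python) =====
-- def longest_shortest_successful_run_times(log_entries):
--     successful_runs = [(time, app_name, duration) for log_type, app_name, time, _, duration in log_entries
--                        if log_type == 'INFO' and duration is not None]
--
--     if not successful_runs:
--         output = "\nNo successful runs found."
--         return output
--
--     # Find the longest and shortest successful run times
--     longest_run = max(successful_runs, key=lambda x: x[2])
--     shortest_run = min(successful_runs, key=lambda x: x[2])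
--
--     output = f"\nLongest Run: {longest_run[1]} {longest_run[0]} {longest_run[2]}ms"
--     output += f"\nShortest Run: {shortest_run[1]} {shortest_run[0]} {shortest_run[2]}ms"
--     return output
-- ===== SOURCE B (Python) =====
-- def longest_shortest_successful_run_times(log_entries):
--     longest = None
--     shortest = None
--     for log_type, app_name, time, _, duration in log_entries:
--         if log_type != 'INFO' or duration is None:
--             continue
--         run = (time, app_name, duration)
--         if longest is None:
--             longest = run
--             shortest = run
--         else:
--             if duration > longest[2]:
--                 longest = run
--             if duration < shortest[2]:
--                 shortest = run
--     if longest is None: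
--         return "\nNo successful runs found."
--     return (f"\nLongest Run: {longest[1]} {longest[0]} {longest[2]}ms"
--             f"\nShortest Run: {shortest[1]} {shortest[0]} {shortest[2]}ms")
-- ===== Notes on version B (the rewrite author's own statement) =====
-- stated objective: alternative
-- what changed: Replaced A's comprehension plus two separate max/min scans (three passes, an intermediate list) with one fused single pass that maintains longest/shortest records with strict comparisons, preserving first-occurrence tie behavior.
import Mathlib
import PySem

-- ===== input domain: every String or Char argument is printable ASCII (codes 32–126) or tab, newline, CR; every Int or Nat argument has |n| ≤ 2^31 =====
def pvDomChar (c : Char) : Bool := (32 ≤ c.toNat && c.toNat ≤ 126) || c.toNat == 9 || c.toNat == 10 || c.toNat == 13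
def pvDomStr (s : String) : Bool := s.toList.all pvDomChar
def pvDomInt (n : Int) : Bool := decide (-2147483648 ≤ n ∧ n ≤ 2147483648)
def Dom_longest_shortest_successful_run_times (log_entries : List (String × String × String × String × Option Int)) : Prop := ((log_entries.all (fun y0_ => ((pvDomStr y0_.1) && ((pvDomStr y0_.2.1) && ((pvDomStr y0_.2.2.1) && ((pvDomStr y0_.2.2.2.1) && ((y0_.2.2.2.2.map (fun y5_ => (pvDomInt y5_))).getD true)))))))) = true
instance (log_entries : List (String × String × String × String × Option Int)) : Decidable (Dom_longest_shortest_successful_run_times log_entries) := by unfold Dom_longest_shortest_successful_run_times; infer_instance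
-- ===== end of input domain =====

-- ===== PORT A =====
-- one honest line: B fuses A's list comprehension and the two max/min scans into a single pass with strict-comparison updates (alternative decomposition, same result).
-- A-side helper: the body of A's list comprehension (filter + projection of one entry)
def lssrF (e : String × String × String × String × Option Int) : Option (String × String × Int) :=
  match e with
  | (log_type, app_name, time, _, duration) =>
    if log_type == "INFO" then
      match duration with
      | some d => some (time, app_name, d)
      | none => none
    else none

def longest_shortest_successful_run_times (log_entries : List (String × String × String × String × Option Int)) : String :=
  let successful_runs : List (String × String × Int) := log_entries.filterMap lssrF
  if successful_runs.isEmpty then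
    "\nNo successful runs found."
  else
    let longest_run := (PySem.List.max? successful_runs (fun x => x.2.2)).getD ("", "", 0)
    let shortest_run := (PySem.List.min? successful_runs (fun x => x.2.2)).getD ("", "", 0)
    "\nLongest Run: " ++ longest_run.2.1 ++ " " ++ longest_run.1 ++ " " ++ PySem.Int.toStr longest_run.2.2 ++ "ms"
      ++ "\nShortest Run: " ++ shortest_run.2.1 ++ " " ++ shortest_run.1 ++ " " ++ PySem.Int.toStr shortest_run.2.2 ++ "ms"

-- ===== PORT B =====
def lssrAltStep (acc : Option ((String × String × Int) × (String × String × Int)))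
    (e : String × String × String × String × Option Int) :
    Option ((String × String × Int) × (String × String × Int)) :=
  match e with
  | (log_type, app_name, time, _, duration) =>
    if log_type != "INFO" then acc
    else
      match duration with
      | none => acc
      | some d =>
        let run : String × String × Int := (time, app_name, d)
        match acc with
        | none => some (run, run)
        | some (longest, shortest) =>
          some ((if longest.2.2 < d then run else longest),
                (if d < shortest.2.2 then run else shortest))

def longest_shortest_successful_run_times_alt (log_entries : List (String × String × String × String × Option Int)) : String :=
  match log_entries.foldl lssrAltStep none with
  | none => "\nNo successful runs found."
  | some (longest, shortest) =>
    "\nLongest Run: " ++ longest.2.1 ++ " " ++ longest.1 ++ " " ++ PySem.Int.toStr longest.2.2 ++ "ms"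
      ++ "\nShortest Run: " ++ shortest.2.1 ++ " " ++ shortest.1 ++ " " ++ PySem.Int.toStr shortest.2.2 ++ "ms"

-- ===== PRECONDITION & SPEC =====
def Spec_longest_shortest_successful_run_times (log_entries : List (String × String × String × String × Option Int)) (out : String) : Prop := out = longest_shortest_successful_run_times_alt log_entries
instance (log_entries : List (String × String × String × String × Option Int)) (out : String) : Decidable (Spec_longest_shortest_successful_run_times log_entries out) := by unfold Spec_longest_shortest_successful_run_times; infer_instance

-- ===== CLAIM (what is proved, stated in full; the proofs are below) =====
def Claim_equal_longest_shortest_successful_run_times : Prop := ∀ (log_entries : List (String × String × String × String × Option Int)), Dom_longest_shortest_successful_run_times log_entries → Spec_longest_shortest_successful_run_times log_entries (longest_shortest_successful_run_times log_entries)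

-- ===== LEMMAS AND PROOFS =====

-- B's combining step on an already-filtered run
def lssrComb (acc : Option ((String × String × Int) × (String × String × Int)))
    (r : String × String × Int) :
    Option ((String × String × Int) × (String × String × Int)) :=
  match acc with
  | none => some (r, r)
  | some (longest, shortest) =>
    some ((if longest.2.2 < r.2.2 then r else longest),
          (if r.2.2 < shortest.2.2 then r else shortest))

def lssrM (m x : String × String × Int) : String × String × Int :=
  if m.2.2 < x.2.2 then x else m

def lssrS (m x : String × String × Int) : String × String × Int :=
  if x.2.2 < m.2.2 then x else m

theorem lssrAltStep_eq (acc : Option ((String × String × Int) × (String × String × Int)))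
    (e : String × String × String × String × Option Int) :
    lssrAltStep acc e = match lssrF e with
      | none => acc
      | some r => lssrComb acc r := by
  obtain ⟨lt, an, tm, x, dur⟩ := e
  cases h : lt == "INFO" <;> cases dur <;> simp [lssrAltStep, lssrF, lssrComb, h] <;> simp_all

theorem lssr_fold_filter (l : List (String × String × String × String × Option Int))
    (acc : Option ((String × String × Int) × (String × String × Int))) :
    l.foldl lssrAltStep acc = (l.filterMap lssrF).foldl lssrComb acc := by
  induction l generalizing acc with
  | nil => rfl
  | cons e t ih =>
    rw [List.foldl_cons, List.filterMap_cons, lssrAltStep_eq]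
    cases h : lssrF e <;> simp [ih]

theorem lssr_comb_split (t : List (String × String × Int)) (lo sh : String × String × Int) :
    t.foldl lssrComb (some (lo, sh)) = some (t.foldl lssrM lo, t.foldl lssrS sh) := by
  induction t generalizing lo sh with
  | nil => rfl
  | cons x t ih =>
    rw [List.foldl_cons, List.foldl_cons, List.foldl_cons]
    exact ih _ _

theorem lssr_max?_cons (x : String × String × Int) (t : List (String × String × Int)) :
    PySem.List.max? (x :: t) (fun y => y.2.2) = some (t.foldl lssrM x) := by
  induction t generalizing x with
  | nil => rfl
  | cons y t ih =>
    by_cases h : x.2.2 < y.2.2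
    · have e : PySem.List.max? (x :: y :: t) (fun z => z.2.2)
          = PySem.List.max? (y :: t) (fun z => z.2.2) := by
        simp [PySem.List.max?, h]
      rw [e, ih, List.foldl_cons, lssrM, if_pos h]
    · have e : PySem.List.max? (x :: y :: t) (fun z => z.2.2)
          = PySem.List.max? (x :: t) (fun z => z.2.2) := by
        simp [PySem.List.max?, h]
      rw [e, ih, List.foldl_cons, lssrM, if_neg h]

theorem lssr_min?_cons (x : String × String × Int) (t : List (String × String × Int)) :
    PySem.List.min? (x :: t) (fun y => y.2.2) = some (t.foldl lssrS x) := by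
  induction t generalizing x with
  | nil => rfl
  | cons y t ih =>
    by_cases h : y.2.2 < x.2.2
    · have e : PySem.List.min? (x :: y :: t) (fun z => z.2.2)
          = PySem.List.min? (y :: t) (fun z => z.2.2) := by
        simp [PySem.List.min?, h]
      rw [e, ih, List.foldl_cons, lssrS, if_pos h]
    · have e : PySem.List.min? (x :: y :: t) (fun z => z.2.2)
          = PySem.List.min? (x :: t) (fun z => z.2.2) := by
        simp [PySem.List.min?, h]
      rw [e, ih, List.foldl_cons, lssrS, if_neg h]

-- ===== VERDICT (by name: the statement is the Claim_ definition above) =====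
theorem longest_shortest_successful_run_times_spec : Claim_equal_longest_shortest_successful_run_times := by
  intro l _
  unfold Spec_longest_shortest_successful_run_times
  unfold longest_shortest_successful_run_times longest_shortest_successful_run_times_alt
  rw [lssr_fold_filter]
  cases hsr : l.filterMap lssrF with
  | nil => rfl
  | cons x t =>
    rw [List.foldl_cons]
    have h0 : lssrComb none x = some (x, x) := rfl
    rw [h0, lssr_comb_split]
    simp only [List.isEmpty_cons]
    rw [lssr_max?_cons, lssr_min?_cons]
    simp
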